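-- pv_equiv track=rewrite | github.com/jym2584/assignments-swen123 | assignment-08-jym2584/activities_fri.py | swapper3
-- ===== SOURCE A (Python) =====
-- def swapper3(a_list): ## without slicing
--     swapped = []
--     half = len(a_list) // 2
--     for i in range(0, half):
--         swapped.append(a_list[i])
--     for i in range(half, len(a_list)):
--         swapped.append(a_list[i])
--     swapped = a_list[half:] + a_list[:half]
--     return swapped
-- ===== SOURCE B (Python) =====
-- def swapper3(a_list):
--     n = len(a_list)
--     half = n // 2
--     return [a_list[(i + half) % n] for i in range(n)]
-- ===== Notes on version B (the rewrite author's own statement) =====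
-- stated objective: simpler
-- what changed: B drops A's two dead accumulation loops and the slice concatenation, building the rotated list in one pass via the modular index a_list[(i + half) % n].
import Mathlib
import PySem

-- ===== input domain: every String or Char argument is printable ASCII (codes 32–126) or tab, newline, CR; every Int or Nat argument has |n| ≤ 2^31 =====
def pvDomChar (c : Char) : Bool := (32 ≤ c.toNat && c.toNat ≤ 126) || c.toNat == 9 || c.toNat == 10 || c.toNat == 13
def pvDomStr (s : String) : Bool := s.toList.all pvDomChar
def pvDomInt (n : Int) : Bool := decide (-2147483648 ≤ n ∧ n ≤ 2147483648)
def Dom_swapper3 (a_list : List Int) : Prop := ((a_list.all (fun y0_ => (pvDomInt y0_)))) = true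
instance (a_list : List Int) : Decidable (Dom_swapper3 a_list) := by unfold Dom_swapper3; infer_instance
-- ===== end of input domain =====

-- B replaces A's dead loops and slice concatenation by a single modular-index pass (objective: simpler).

-- ===== PORT A =====
def swapper3 (a_list : List Int) : List Int :=
  let swapped : List Int := []
  let half : Int := PySem.Int.floordiv (a_list.length : Int) 2
  let swapped := (PySem.List.pyRange 0 half 1).foldl
    (fun acc i => acc ++ [PySem.List.pyGetD a_list i 0]) swapped
  let swapped := (PySem.List.pyRange half (a_list.length : Int) 1).foldl
    (fun acc i => acc ++ [PySem.List.pyGetD a_list i 0]) swapped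
  let swapped := PySem.List.slice a_list (some half) none ++ PySem.List.slice a_list none (some half)
  swapped

-- ===== PORT B =====
def swapper3_alt (a_list : List Int) : List Int :=
  let n : Int := a_list.length
  let half : Int := PySem.Int.floordiv n 2
  (PySem.List.pyRange 0 n 1).map
    (fun i => PySem.List.pyGetD a_list (PySem.Int.mod (i + half) n) 0)

-- ===== PRECONDITION & SPEC =====
def Spec_swapper3 (a_list : List Int) (out : List Int) : Prop := out = swapper3_alt a_list
instance (a_list : List Int) (out : List Int) : Decidable (Spec_swapper3 a_list out) := by unfold Spec_swapper3; infer_instance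

-- ===== CLAIM (what is proved, stated in full; the proofs are below) =====
def Claim_equal_swapper3 : Prop := ∀ (a_list : List Int), Dom_swapper3 a_list → Spec_swapper3 a_list (swapper3 a_list)

-- ===== LEMMAS AND PROOFS =====
theorem swapper3_rot (a : List Int) :
    a.drop (a.length / 2) ++ a.take (a.length / 2)
      = (List.range a.length).map (fun k => a.getD ((k + a.length / 2) % a.length) 0) := by
  have hh : a.length / 2 ≤ a.length := Nat.div_le_self _ _
  apply List.ext_getElem
  · simp; omega
  · intro j h1 h2
    have hj : j < a.length := by
      simp at h1; omega
    rw [List.getElem_map, List.getElem_range]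
    rcases Nat.lt_or_ge j (a.length - a.length / 2) with hc | hc
    · rw [List.getElem_append_left (by simpa using hc), List.getElem_drop]
      have : (j + a.length / 2) % a.length = a.length / 2 + j := by
        rw [Nat.mod_eq_of_lt (by omega)]; omega
      rw [this, List.getD_eq_getElem a 0 (by omega)]
    · rw [List.getElem_append_right (by simpa using hc)]
      have hlen : (a.drop (a.length / 2)).length = a.length - a.length / 2 := by simp
      rw [List.getElem_take]
      have : (j + a.length / 2) % a.length = j - (a.length - a.length / 2) := by
        have h2N : j + a.length / 2 < 2 * a.length := by omega
        rw [Nat.mod_eq_sub_mod (by omega), Nat.mod_eq_of_lt (by omega)]; omega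
      rw [this, List.getD_eq_getElem a 0 (by omega)]
      congr 1
      omega

-- ===== VERDICT (by name: the statement is the Claim_ definition above) =====
theorem swapper3_spec : Claim_equal_swapper3 := by
  intro a _
  unfold Spec_swapper3 swapper3 swapper3_alt
  have hfd : PySem.Int.floordiv (a.length : Int) 2 = ((a.length / 2 : Nat) : Int) := by
    exact_mod_cast PySem.Int.floordiv_natCast a.length 2
  simp only [hfd, PySem.List.slice_from_natCast,
    PySem.List.slice_to_natCast, PySem.List.pyRange_zero_natCast, List.map_map]
  rw [swapper3_rot]
  apply List.map_congr_left
  intro k hk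
  have hkN : k < a.length := List.mem_range.mp hk
  have hm : PySem.Int.mod ((k : Int) + ((a.length / 2 : Nat) : Int)) (a.length : Int)
      = (((k + a.length / 2) % a.length : Nat) : Int) := by
    push_cast
    exact_mod_cast PySem.Int.mod_natCast (k + a.length / 2) a.length
  simp only [Function.comp_apply, hm, PySem.List.pyGetD_natCast]
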